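-- pv_equiv track=rewrite | github.com/wikiepeidia/predict-future-import-for-Retail-store-products | core/utils.py | format_workspace_tree
-- ===== SOURCE A (Python) =====
-- def format_workspace_tree(workspaces):
--     """Format workspaces for tree-like display"""
--     tree = {
--         'personal': [],
--         'team': [],
--         'scenarios': [],
--         'projects': []
--     }
--
--     for workspace in workspaces:
--         workspace_type = workspace[3]  # type column
--         if workspace_type in tree:
--             tree[workspace_type].append({
--                 'id': workspace[0],
--                 'name': workspace[2],
--                 'description': workspace[4],
--                 'type': workspace_type
--             })
--
--     return tree
-- ===== SOURCE B (Python) =====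
-- CATEGORIES = ('personal', 'team', 'scenarios', 'projects')
--
--
-- def format_workspace_tree(workspaces):
--     """Format workspaces for tree-like display"""
--     return {
--         category: [
--             {'id': w[0], 'name': w[2], 'description': w[4], 'type': category}
--             for w in workspaces
--             if w[3] == category
--         ]
--         for category in CATEGORIES
--     }
-- ===== Notes on version B (the rewrite author's own statement) =====
-- stated objective: alternative
-- what changed: Inverts the loop nesting: instead of one dispatching pass that appends into a pre-built dict of buckets, B builds the result by a dict comprehension over the fixed category tuple, scanning the workspace list once per category with a filter.
import Mathlib
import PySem

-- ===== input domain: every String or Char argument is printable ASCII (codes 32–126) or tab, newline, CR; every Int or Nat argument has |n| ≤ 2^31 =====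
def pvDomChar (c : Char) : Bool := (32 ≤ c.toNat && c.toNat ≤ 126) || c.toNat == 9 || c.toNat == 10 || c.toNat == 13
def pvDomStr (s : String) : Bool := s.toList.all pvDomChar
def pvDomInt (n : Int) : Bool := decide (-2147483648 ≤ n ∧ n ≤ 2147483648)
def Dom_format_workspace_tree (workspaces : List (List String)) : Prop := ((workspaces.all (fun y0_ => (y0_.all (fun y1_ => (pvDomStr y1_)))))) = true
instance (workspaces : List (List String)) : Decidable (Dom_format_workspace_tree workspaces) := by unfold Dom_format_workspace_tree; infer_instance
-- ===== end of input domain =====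

-- B replaces A's single dispatching pass (append into a pre-built dict of buckets)
-- with a category-driven comprehension: one filtered scan of the list per fixed category.

-- ===== PORT A =====
-- the inner dict {'id': …, 'name': …, 'description': …, 'type': …} built identically by both Pythons; pyGetD is exact under Pre_ (indices in range)
def pvRow (w : List String) (wt : String) : List (String × String) :=
  [("id", PySem.List.pyGetD w 0 ""), ("name", PySem.List.pyGetD w 2 ""),
   ("description", PySem.List.pyGetD w 4 ""), ("type", wt)]

def pvTreeInit : PySem.Dict String (List (List (String × String))) :=
  PySem.Dict.mk [("personal", []), ("team", []), ("scenarios", []), ("projects", [])]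

-- loop body of A's for-loop
def pvStep (tree : PySem.Dict String (List (List (String × String)))) (w : List String) :
    PySem.Dict String (List (List (String × String))) :=
  let wt := PySem.List.pyGetD w 3 ""   -- workspace[3]; in range under Pre_
  if tree.contains wt then
    tree.modify wt [] (fun l => l ++ [pvRow w wt])
  else tree

def format_workspace_tree (workspaces : List (List String)) : List (String × List (List (String × String))) :=
  (workspaces.foldl pvStep pvTreeInit).items

-- ===== PORT B =====
def pvCategories : List String := ["personal", "team", "scenarios", "projects"]

def format_workspace_tree_alt (workspaces : List (List String)) : List (String × List (List (String × String))) :=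
  pvCategories.map (fun c =>
    (c, (workspaces.filter (fun w => PySem.List.pyGetD w 3 "" == c)).map (fun w => pvRow w c)))

-- ===== PRECONDITION & SPEC =====
-- Pre_ excludes exactly the inputs where the Python A raises IndexError: a row shorter
-- than 4 (workspace[3]), or a row of length 4 whose type is a category (workspace[4]).
def Pre_format_workspace_tree (workspaces : List (List String)) : Prop :=
  ∀ w ∈ workspaces, 4 ≤ w.length ∧
    (w.getD 3 "" ∈ ["personal", "team", "scenarios", "projects"] → 5 ≤ w.length)
instance (workspaces : List (List String)) : Decidable (Pre_format_workspace_tree workspaces) := by unfold Pre_format_workspace_tree; infer_instance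

def pvWitness_format_workspace_tree : List (List String) :=
  [["1", "u", "Home", "personal", "my space"], ["2", "u", "Q3", "projects", "plan"], ["3", "u", "Misc", "other", "x"]]

def Spec_format_workspace_tree (workspaces : List (List String)) (out : List (String × List (List (String × String)))) : Prop := out = format_workspace_tree_alt workspaces
instance (workspaces : List (List String)) (out : List (String × List (List (String × String)))) : Decidable (Spec_format_workspace_tree workspaces out) := by unfold Spec_format_workspace_tree; infer_instance

-- ===== CLAIM (what is proved, stated in full; the proofs are below) =====
def Claim_equal_format_workspace_tree : Prop := ∀ (workspaces : List (List String)), Dom_format_workspace_tree workspaces → Pre_format_workspace_tree workspaces → Spec_format_workspace_tree workspaces (format_workspace_tree workspaces)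

-- ===== LEMMAS AND PROOFS =====

-- B's bucket for one category
def pvBucket (c : String) (ws : List (List String)) : List (List (String × String)) :=
  (ws.filter (fun w => PySem.List.pyGetD w 3 "" == c)).map (fun w => pvRow w c)

-- invariant of A's fold: starting from arbitrary accumulated buckets, the fold appends B's buckets
lemma pv_fold_inv (ws : List (List String)) (p t s r : List (List (String × String))) :
    ws.foldl pvStep
      (PySem.Dict.mk [("personal", p), ("team", t), ("scenarios", s), ("projects", r)])
    = PySem.Dict.mk [("personal", p ++ pvBucket "personal" ws), ("team", t ++ pvBucket "team" ws),
        ("scenarios", s ++ pvBucket "scenarios" ws), ("projects", r ++ pvBucket "projects" ws)] := by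
  induction ws generalizing p t s r with
  | nil => simp [pvBucket]
  | cons w ws ih =>
    rw [List.foldl_cons]
    by_cases h1 : PySem.List.pyGetD w 3 "" = "personal"
    · have hstep : pvStep (PySem.Dict.mk [("personal", p), ("team", t), ("scenarios", s), ("projects", r)]) w
          = PySem.Dict.mk [("personal", p ++ [pvRow w "personal"]), ("team", t), ("scenarios", s), ("projects", r)] := by
        simp [pvStep, PySem.Dict.contains, PySem.Dict.modify, PySem.Dict.insert, PySem.Dict.get?, PySem.Dict.getD, h1]
      rw [hstep, ih]
      simp [pvBucket, pvRow, h1]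
    · by_cases h2 : PySem.List.pyGetD w 3 "" = "team"
      · have hstep : pvStep (PySem.Dict.mk [("personal", p), ("team", t), ("scenarios", s), ("projects", r)]) w
            = PySem.Dict.mk [("personal", p), ("team", t ++ [pvRow w "team"]), ("scenarios", s), ("projects", r)] := by
          simp [pvStep, PySem.Dict.contains, PySem.Dict.modify, PySem.Dict.insert, PySem.Dict.get?, PySem.Dict.getD, h2]
        rw [hstep, ih]
        simp [pvBucket, pvRow, h2]
      · by_cases h3 : PySem.List.pyGetD w 3 "" = "scenarios"
        · have hstep : pvStep (PySem.Dict.mk [("personal", p), ("team", t), ("scenarios", s), ("projects", r)]) w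
              = PySem.Dict.mk [("personal", p), ("team", t), ("scenarios", s ++ [pvRow w "scenarios"]), ("projects", r)] := by
            simp [pvStep, PySem.Dict.contains, PySem.Dict.modify, PySem.Dict.insert, PySem.Dict.get?, PySem.Dict.getD, h3]
          rw [hstep, ih]
          simp [pvBucket, pvRow, h3]
        · by_cases h4 : PySem.List.pyGetD w 3 "" = "projects"
          · have hstep : pvStep (PySem.Dict.mk [("personal", p), ("team", t), ("scenarios", s), ("projects", r)]) w
                = PySem.Dict.mk [("personal", p), ("team", t), ("scenarios", s), ("projects", r ++ [pvRow w "projects"])] := by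
              simp [pvStep, PySem.Dict.contains, PySem.Dict.modify, PySem.Dict.insert, PySem.Dict.get?, PySem.Dict.getD, h4]
            rw [hstep, ih]
            simp [pvBucket, pvRow, h4]
          · have hstep : pvStep (PySem.Dict.mk [("personal", p), ("team", t), ("scenarios", s), ("projects", r)]) w
                = PySem.Dict.mk [("personal", p), ("team", t), ("scenarios", s), ("projects", r)] := by
              simp [pvStep, PySem.Dict.contains, Ne.symm h1, Ne.symm h2, Ne.symm h3, Ne.symm h4]
            rw [hstep, ih]
            simp [pvBucket, h1, h2, h3, h4]

-- ===== VERDICT (by name: the statement is the Claim_ definition above) =====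
theorem format_workspace_tree_spec : Claim_equal_format_workspace_tree := by
  intro ws _ _
  unfold Spec_format_workspace_tree format_workspace_tree format_workspace_tree_alt pvTreeInit
  rw [pv_fold_inv]
  simp [pvCategories, pvBucket]
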